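-- pv_equiv track=rewrite | github.com/Ahjan108/phoenix_omega_v4.8 | scripts/video/run_caption_adapter.py | _last_complete_clause_boundary
-- ===== SOURCE A (Python) =====
-- def _last_complete_clause_boundary(text: str, max_chars: int) -> int:
--     if len(text) <= max_chars:
--         return len(text)
--     chunk = text[: max_chars + 1]
--     for sep in [". ", "! ", "? ", "; ", ", "]:
--         idx = chunk.rfind(sep)
--         if idx != -1:
--             return idx + len(sep)
--     idx = chunk.rfind(" ")
--     return idx + 1 if idx != -1 else max_chars
-- ===== SOURCE B (Python) =====
-- def _last_complete_clause_boundary(text: str, max_chars: int) -> int: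
--     n = len(text)
--     if n <= max_chars:
--         return n
--     chunk = text[: max_chars + 1]
--     # one pass: every separator is "<punct><space>", so scan for spaces and
--     # classify each by the character before it; remember the last hit per punct
--     last = {".": -1, "!": -1, "?": -1, ";": -1, ",": -1}
--     space = -1
--     for i in range(len(chunk)):
--         if chunk[i] == " ":
--             space = i
--             if i and chunk[i - 1] in last:
--                 last[chunk[i - 1]] = i - 1
--     for p in ".!?;,":
--         if last[p] != -1:
--             return last[p] + 2
--     return space + 1 if space != -1 else max_chars
-- ===== Notes on version B (the rewrite author's own statement) =====
-- stated objective: alternative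
-- what changed: A runs five separate rfind substring scans (plus a sixth for a bare space) over the chunk; B makes one left-to-right pass that records the last space position and, for each space, classifies it by the preceding punctuation character into a dict of last-hit indices, then resolves the original priority order on the recorded indices.
import Mathlib
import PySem

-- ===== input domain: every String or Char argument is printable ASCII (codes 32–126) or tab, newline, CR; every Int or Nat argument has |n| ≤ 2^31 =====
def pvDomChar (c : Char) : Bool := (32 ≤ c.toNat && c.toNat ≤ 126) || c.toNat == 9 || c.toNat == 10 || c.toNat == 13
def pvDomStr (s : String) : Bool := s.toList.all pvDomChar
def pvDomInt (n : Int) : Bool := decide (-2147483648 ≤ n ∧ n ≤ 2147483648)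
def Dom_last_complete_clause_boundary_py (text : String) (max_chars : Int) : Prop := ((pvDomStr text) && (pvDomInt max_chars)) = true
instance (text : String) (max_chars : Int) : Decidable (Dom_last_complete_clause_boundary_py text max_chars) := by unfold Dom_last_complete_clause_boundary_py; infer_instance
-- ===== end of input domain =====

-- B replaces A's five rfind substring scans by one left-to-right pass that classifies
-- each space by the character before it (objective: alternative single-pass decomposition).

-- ===== PORT A =====
def pvSepsA : List (List Char) := [['.', ' '], ['!', ' '], ['?', ' '], [';', ' '], [',', ' ']]

-- the 'for sep in [...]' early-return loop of A
def pvALoop (chunk : List Char) : List (List Char) → Option Int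
  | [] => none
  | sep :: rest =>
    let idx := PySem.Chars.rfind chunk sep
    if idx ≠ -1 then some (idx + PySem.List.len sep) else pvALoop chunk rest

def last_complete_clause_boundary_py (text : String) (max_chars : Int) : Int :=
  if PySem.Chars.len text.toList ≤ max_chars then PySem.Chars.len text.toList
  else
    let chunk := PySem.Chars.slice text.toList none (some (max_chars + 1))
    match pvALoop chunk pvSepsA with
    | some r => r
    | none =>
      let idx := PySem.Chars.rfind chunk [' ']
      if idx ≠ -1 then idx + 1 else max_chars

-- ===== PORT B =====
-- Source B's dict {".": -1, "!": -1, "?": -1, ";": -1, ",": -1}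
def pvInitLast : PySem.Dict Char Int :=
  PySem.Dict.mk [('.', -1), ('!', -1), ('?', -1), (';', -1), (',', -1)]

-- one iteration of Source B's 'for i in range(len(chunk))' loop
def pvBStep (chunk : List Char) (st : PySem.Dict Char Int × Int) (i : Int) :
    PySem.Dict Char Int × Int :=
  if PySem.List.pyGetD chunk i ' ' == ' ' then
    if decide (i ≠ 0) && st.1.contains (PySem.List.pyGetD chunk (i - 1) ' ') then
      (st.1.insert (PySem.List.pyGetD chunk (i - 1) ' ') (i - 1), i)
    else (st.1, i)
  else st

-- Source B's 'for p in ".!?;,"' early-return loop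
def pvBRes (last : PySem.Dict Char Int) : List Char → Option Int
  | [] => none
  | p :: rest =>
    if last.getD p (-1) ≠ -1 then some (last.getD p (-1) + 2) else pvBRes last rest

def last_complete_clause_boundary_py_alt (text : String) (max_chars : Int) : Int :=
  let n := PySem.Chars.len text.toList
  if n ≤ max_chars then n
  else
    let chunk := PySem.Chars.slice text.toList none (some (max_chars + 1))
    let st := (PySem.List.pyRange 0 (PySem.Chars.len chunk)).foldl (pvBStep chunk) (pvInitLast, -1)
    match pvBRes st.1 ['.', '!', '?', ';', ','] with
    | some r => r
    | none => if st.2 ≠ -1 then st.2 + 1 else max_chars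

-- ===== PRECONDITION & SPEC =====
def Spec_last_complete_clause_boundary_py (text : String) (max_chars : Int) (out : Int) : Prop := out = last_complete_clause_boundary_py_alt text max_chars
instance (text : String) (max_chars : Int) (out : Int) : Decidable (Spec_last_complete_clause_boundary_py text max_chars out) := by unfold Spec_last_complete_clause_boundary_py; infer_instance

-- ===== CLAIM (what is proved, stated in full; the proofs are below) =====
def Claim_equal_last_complete_clause_boundary_py : Prop := ∀ (text : String) (max_chars : Int), Dom_last_complete_clause_boundary_py text max_chars → Spec_last_complete_clause_boundary_py text max_chars (last_complete_clause_boundary_py text max_chars)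

-- ===== LEMMAS AND PROOFS =====

-- the common yardstick: last index j < n with p j, else -1
def pvLastIdx (p : Nat → Bool) : Nat → Int
  | 0 => -1
  | n + 1 => if p n then (n : Int) else pvLastIdx p n

-- 'chunk[j:j+2] == c + " "' as a predicate on j
def pvPSep (chunk : List Char) (c : Char) (j : Nat) : Bool :=
  decide (chunk[j]? = some c ∧ chunk[j + 1]? = some ' ')

-- 'chunk[j] == " "' as a predicate on j
def pvPSp (chunk : List Char) (j : Nat) : Bool := decide (chunk[j]? = some ' ')

-- Source B's dict with symbolic values
def pvMkD (v1 v2 v3 v4 v5 : Int) : PySem.Dict Char Int :=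
  PySem.Dict.mk [('.', v1), ('!', v2), ('?', v3), (';', v4), (',', v5)]

lemma pvLastIdx_succ_false {p : Nat → Bool} {n : Nat} (h : p n = false) :
    pvLastIdx p (n + 1) = pvLastIdx p n := by simp [pvLastIdx, h]

lemma pvLastIdx_succ_true {p : Nat → Bool} {n : Nat} (h : p n = true) :
    pvLastIdx p (n + 1) = (n : Int) := by simp [pvLastIdx, h]

lemma pv_go_eq (s sub : List Char) (m : Nat) :
    PySem.Chars.rfind.go s sub m = pvLastIdx (fun j => sub.isPrefixOf (s.drop j)) (m + 1) := by
  induction m with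
  | zero =>
    show (if sub.isPrefixOf (s.drop 0) then (0 : Int) else -1) = _
    simp [pvLastIdx]
  | succ j ih =>
    show (if sub.isPrefixOf (s.drop (j + 1)) then ((j : Int) + 1) else PySem.Chars.rfind.go s sub j) = _
    rw [ih]
    by_cases h : sub.isPrefixOf (s.drop (j + 1)) = true
    · rw [pvLastIdx_succ_true (p := fun j => sub.isPrefixOf (s.drop j)) (n := j + 1) h]
      simp [h]
    · rw [pvLastIdx_succ_false (p := fun j => sub.isPrefixOf (s.drop j)) (n := j + 1)
        (Bool.eq_false_iff.mpr h)]
      simp [h]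

lemma pv_isPrefixOf_pair (c d : Char) (l : List Char) :
    [c, d].isPrefixOf l = decide (l[0]? = some c ∧ l[1]? = some d) := by
  match l with
  | [] => simp [List.isPrefixOf]
  | [x] => simp [List.isPrefixOf]
  | x :: y :: r => simp [List.isPrefixOf, Bool.beq_eq_decide_eq, eq_comm]

lemma pv_isPrefixOf_single (c : Char) (l : List Char) :
    [c].isPrefixOf l = decide (l[0]? = some c) := by
  match l with
  | [] => simp [List.isPrefixOf]
  | x :: r => simp [List.isPrefixOf, Bool.beq_eq_decide_eq, eq_comm]

lemma pvLastIdx_congr {p q : Nat → Bool} (h : ∀ j, p j = q j) :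
    ∀ n, pvLastIdx p n = pvLastIdx q n
  | 0 => rfl
  | n + 1 => by simp [pvLastIdx, h n, pvLastIdx_congr h n]

lemma pvRfind_pair (chunk : List Char) (c : Char) :
    PySem.Chars.rfind chunk [c, ' '] = pvLastIdx (pvPSep chunk c) (chunk.length - 1) := by
  have hc : ∀ j, (fun j => List.isPrefixOf [c, ' '] (chunk.drop j)) j = pvPSep chunk c j := by
    intro j
    show [c, ' '].isPrefixOf (chunk.drop j) = _
    rw [pv_isPrefixOf_pair]
    simp [pvPSep, List.getElem?_drop]
  show PySem.Chars.rfind.go chunk [c, ' '] chunk.length = _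
  rw [pv_go_eq, pvLastIdx_congr hc]
  rw [pvLastIdx_succ_false (by simp [pvPSep])]
  cases hn : chunk.length with
  | zero => simp
  | succ m =>
    have h2 : pvPSep chunk c m = false := by
      have : chunk[m + 1]? = none := List.getElem?_eq_none (by omega)
      simp [pvPSep, this]
    rw [pvLastIdx_succ_false h2]
    simp

lemma pvRfind_space (chunk : List Char) :
    PySem.Chars.rfind chunk [' '] = pvLastIdx (pvPSp chunk) chunk.length := by
  have hc : ∀ j, (fun j => List.isPrefixOf [' '] (chunk.drop j)) j = pvPSp chunk j := by
    intro j
    show [' '].isPrefixOf (chunk.drop j) = _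
    rw [pv_isPrefixOf_single]
    simp [pvPSp, List.getElem?_drop]
  show PySem.Chars.rfind.go chunk [' '] chunk.length = _
  rw [pv_go_eq, pvLastIdx_congr hc]
  rw [pvLastIdx_succ_false (by simp [pvPSp])]

lemma pvRange_snoc (n : Nat) :
    PySem.List.pyRange 0 ((n : Int) + 1) = PySem.List.pyRange 0 (n : Int) ++ [(n : Int)] := by
  rw [PySem.List.pyRange_one_append 0 (n : Int) ((n : Int) + 1) (Int.natCast_nonneg n) (by omega),
      PySem.List.pyRange_one_cons (a := (n : Int)) (b := (n : Int) + 1) (by omega)]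
  norm_num [PySem.List.pyRange]

lemma pvMkD_contains (v1 v2 v3 v4 v5 : Int) (c : Char) :
    (pvMkD v1 v2 v3 v4 v5).contains c =
      ('.' == c || ('!' == c || ('?' == c || (';' == c || ',' == c)))) := by
  simp [pvMkD, PySem.Dict.contains]

lemma pvMkD_ins1 (v1 v2 v3 v4 v5 w : Int) : (pvMkD v1 v2 v3 v4 v5).insert '.' w = pvMkD w v2 v3 v4 v5 := rfl
lemma pvMkD_ins2 (v1 v2 v3 v4 v5 w : Int) : (pvMkD v1 v2 v3 v4 v5).insert '!' w = pvMkD v1 w v3 v4 v5 := rfl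
lemma pvMkD_ins3 (v1 v2 v3 v4 v5 w : Int) : (pvMkD v1 v2 v3 v4 v5).insert '?' w = pvMkD v1 v2 w v4 v5 := rfl
lemma pvMkD_ins4 (v1 v2 v3 v4 v5 w : Int) : (pvMkD v1 v2 v3 v4 v5).insert ';' w = pvMkD v1 v2 v3 w v5 := rfl
lemma pvMkD_ins5 (v1 v2 v3 v4 v5 w : Int) : (pvMkD v1 v2 v3 v4 v5).insert ',' w = pvMkD v1 v2 v3 v4 w := rfl

lemma pvSlot_hit {chunk : List Char} {c : Char} {n : Nat} (hn0 : n ≠ 0)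
    (hprev : chunk[n - 1]? = some c) (hsp : chunk[n]? = some ' ') :
    pvLastIdx (pvPSep chunk c) n = ((n - 1 : Nat) : Int) := by
  obtain ⟨m, rfl⟩ : ∃ m, n = m + 1 := ⟨n - 1, by omega⟩
  simp only [Nat.add_sub_cancel] at hprev ⊢
  exact pvLastIdx_succ_true (by simp [pvPSep, hprev, hsp])

lemma pvSlot_miss {chunk : List Char} {c : Char} {n : Nat}
    (h : ¬(chunk[n - 1]? = some c ∧ chunk[n]? = some ' ')) :
    pvLastIdx (pvPSep chunk c) n = pvLastIdx (pvPSep chunk c) (n - 1) := by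
  cases n with
  | zero => rfl
  | succ m =>
    simp only [Nat.add_sub_cancel] at h ⊢
    exact pvLastIdx_succ_false (by simp [pvPSep]; tauto)

lemma pvBLoop_inv (chunk : List Char) (n : Nat) (hn : n ≤ chunk.length) :
    (PySem.List.pyRange 0 (n : Int)).foldl (pvBStep chunk) (pvInitLast, -1) =
      (pvMkD (pvLastIdx (pvPSep chunk '.') (n - 1)) (pvLastIdx (pvPSep chunk '!') (n - 1))
             (pvLastIdx (pvPSep chunk '?') (n - 1)) (pvLastIdx (pvPSep chunk ';') (n - 1))
             (pvLastIdx (pvPSep chunk ',') (n - 1)),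
       pvLastIdx (pvPSp chunk) n) := by
  induction n with
  | zero =>
    show (pvInitLast, -1) = _
    norm_num [PySem.List.pyRange, pvLastIdx, pvInitLast, pvMkD]
  | succ n ih =>
    have hlt : n < chunk.length := hn
    rw [show ((n + 1 : Nat) : Int) = (n : Int) + 1 by push_cast; ring, pvRange_snoc,
        List.foldl_append, ih (by omega)]
    simp only [List.foldl_cons, List.foldl_nil]
    have hget : PySem.List.pyGetD chunk (n : Int) ' ' = chunk[n] := by
      simp [List.getD_eq_getElem?_getD, List.getElem?_eq_getElem hlt]
    have hgetn : chunk[n]? = some chunk[n] := List.getElem?_eq_getElem hlt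
    rw [pvBStep, hget]
    by_cases hsp : chunk[n] = ' '
    · -- space at n
      rw [if_pos (by simp [hsp])]
      have hspn : chunk[n]? = some ' ' := by rw [hgetn, hsp]
      have hs : pvLastIdx (pvPSp chunk) (n + 1) = (n : Int) :=
        pvLastIdx_succ_true (by simp [pvPSp, hspn])
      by_cases hn0 : n = 0
      · subst hn0
        rw [if_neg (by simp)]
        simp only [Nat.add_sub_cancel, hs]
      · -- n ≥ 1: look at the previous character
        have hprevlt : n - 1 < chunk.length := by omega
        have hidx : (n : Int) - 1 = ((n - 1 : Nat) : Int) := by omega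
        have hprev : PySem.List.pyGetD chunk ((n : Int) - 1) ' ' = chunk[n - 1] := by
          rw [hidx]
          simp [List.getD_eq_getElem?_getD, List.getElem?_eq_getElem hprevlt]
        have hprevn : chunk[n - 1]? = some chunk[n - 1] := List.getElem?_eq_getElem hprevlt
        rw [hprev, pvMkD_contains]
        by_cases h1 : ('.' : Char) = chunk[n - 1]
        · rw [if_pos (by simp [hn0, ← h1]), ← h1, pvMkD_ins1, hidx]
          simp only [Nat.add_sub_cancel, hs,
            pvSlot_hit (chunk := chunk) (n := n) hn0 (h1 ▸ hprevn) hspn,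
            pvSlot_miss (chunk := chunk) (n := n) (c := '!') (by simp [hprevn, ← h1]),
            pvSlot_miss (chunk := chunk) (n := n) (c := '?') (by simp [hprevn, ← h1]),
            pvSlot_miss (chunk := chunk) (n := n) (c := ';') (by simp [hprevn, ← h1]),
            pvSlot_miss (chunk := chunk) (n := n) (c := ',') (by simp [hprevn, ← h1])]
        · by_cases h2 : ('!' : Char) = chunk[n - 1]
          · rw [if_pos (by simp [hn0, ← h2]), ← h2, pvMkD_ins2, hidx]
            simp only [Nat.add_sub_cancel, hs,
              pvSlot_hit (chunk := chunk) (n := n) hn0 (h2 ▸ hprevn) hspn,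
              pvSlot_miss (chunk := chunk) (n := n) (c := '.') (by simp [hprevn, ← h2]),
              pvSlot_miss (chunk := chunk) (n := n) (c := '?') (by simp [hprevn, ← h2]),
              pvSlot_miss (chunk := chunk) (n := n) (c := ';') (by simp [hprevn, ← h2]),
              pvSlot_miss (chunk := chunk) (n := n) (c := ',') (by simp [hprevn, ← h2])]
          · by_cases h3 : ('?' : Char) = chunk[n - 1]
            · rw [if_pos (by simp [hn0, ← h3]), ← h3, pvMkD_ins3, hidx]
              simp only [Nat.add_sub_cancel, hs,
                pvSlot_hit (chunk := chunk) (n := n) hn0 (h3 ▸ hprevn) hspn,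
                pvSlot_miss (chunk := chunk) (n := n) (c := '.') (by simp [hprevn, ← h3]),
                pvSlot_miss (chunk := chunk) (n := n) (c := '!') (by simp [hprevn, ← h3]),
                pvSlot_miss (chunk := chunk) (n := n) (c := ';') (by simp [hprevn, ← h3]),
                pvSlot_miss (chunk := chunk) (n := n) (c := ',') (by simp [hprevn, ← h3])]
            · by_cases h4 : (';' : Char) = chunk[n - 1]
              · rw [if_pos (by simp [hn0, ← h4]), ← h4, pvMkD_ins4, hidx]
                simp only [Nat.add_sub_cancel, hs,
                  pvSlot_hit (chunk := chunk) (n := n) hn0 (h4 ▸ hprevn) hspn,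
                  pvSlot_miss (chunk := chunk) (n := n) (c := '.') (by simp [hprevn, ← h4]),
                  pvSlot_miss (chunk := chunk) (n := n) (c := '!') (by simp [hprevn, ← h4]),
                  pvSlot_miss (chunk := chunk) (n := n) (c := '?') (by simp [hprevn, ← h4]),
                  pvSlot_miss (chunk := chunk) (n := n) (c := ',') (by simp [hprevn, ← h4])]
              · by_cases h5 : (',' : Char) = chunk[n - 1]
                · rw [if_pos (by simp [hn0, ← h5]), ← h5, pvMkD_ins5, hidx]
                  simp only [Nat.add_sub_cancel, hs,
                    pvSlot_hit (chunk := chunk) (n := n) hn0 (h5 ▸ hprevn) hspn,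
                    pvSlot_miss (chunk := chunk) (n := n) (c := '.') (by simp [hprevn, ← h5]),
                    pvSlot_miss (chunk := chunk) (n := n) (c := '!') (by simp [hprevn, ← h5]),
                    pvSlot_miss (chunk := chunk) (n := n) (c := '?') (by simp [hprevn, ← h5]),
                    pvSlot_miss (chunk := chunk) (n := n) (c := ';') (by simp [hprevn, ← h5])]
                · rw [if_neg (by simp [h1, h2, h3, h4, h5])]
                  simp only [Nat.add_sub_cancel, hs,
                    pvSlot_miss (chunk := chunk) (n := n) (c := '.') (by simp [hprevn]; intro hh; exact absurd hh.symm h1),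
                    pvSlot_miss (chunk := chunk) (n := n) (c := '!') (by simp [hprevn]; intro hh; exact absurd hh.symm h2),
                    pvSlot_miss (chunk := chunk) (n := n) (c := '?') (by simp [hprevn]; intro hh; exact absurd hh.symm h3),
                    pvSlot_miss (chunk := chunk) (n := n) (c := ';') (by simp [hprevn]; intro hh; exact absurd hh.symm h4),
                    pvSlot_miss (chunk := chunk) (n := n) (c := ',') (by simp [hprevn]; intro hh; exact absurd hh.symm h5)]
    · -- no space at n: state unchanged
      rw [if_neg (by simp [hsp])]
      have hspn : ¬ chunk[n]? = some ' ' := by simp [hgetn, hsp]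
      simp only [Nat.add_sub_cancel,
        pvLastIdx_succ_false (p := pvPSp chunk) (n := n) (by simp [pvPSp, hspn]),
        pvSlot_miss (chunk := chunk) (n := n) (c := '.') (by tauto), pvSlot_miss (chunk := chunk) (n := n) (c := '!') (by tauto),
        pvSlot_miss (chunk := chunk) (n := n) (c := '?') (by tauto), pvSlot_miss (chunk := chunk) (n := n) (c := ';') (by tauto),
        pvSlot_miss (chunk := chunk) (n := n) (c := ',') (by tauto)]

lemma pvMkD_getD1 (v1 v2 v3 v4 v5 : Int) : (pvMkD v1 v2 v3 v4 v5).getD '.' (-1) = v1 := rfl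
lemma pvMkD_getD2 (v1 v2 v3 v4 v5 : Int) : (pvMkD v1 v2 v3 v4 v5).getD '!' (-1) = v2 := rfl
lemma pvMkD_getD3 (v1 v2 v3 v4 v5 : Int) : (pvMkD v1 v2 v3 v4 v5).getD '?' (-1) = v3 := rfl
lemma pvMkD_getD4 (v1 v2 v3 v4 v5 : Int) : (pvMkD v1 v2 v3 v4 v5).getD ';' (-1) = v4 := rfl
lemma pvMkD_getD5 (v1 v2 v3 v4 v5 : Int) : (pvMkD v1 v2 v3 v4 v5).getD ',' (-1) = v5 := rfl

-- ===== VERDICT (by name: the statement is the Claim_ definition above) =====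
theorem last_complete_clause_boundary_py_spec : Claim_equal_last_complete_clause_boundary_py := by
  intro text max_chars _
  unfold Spec_last_complete_clause_boundary_py
  unfold last_complete_clause_boundary_py last_complete_clause_boundary_py_alt
  by_cases hle : PySem.Chars.len text.toList ≤ max_chars
  · have hle' : ((text.length : Int)) ≤ max_chars := by simpa using hle
    simp [hle']
  · simp only [if_neg hle]
    set chunk := PySem.Chars.slice text.toList none (some (max_chars + 1)) with hchunk
    rw [show PySem.Chars.len chunk = (chunk.length : Int) from by simp]
    rw [pvBLoop_inv chunk chunk.length (le_refl _)]
    simp only [pvALoop, pvSepsA, pvBRes, pvMkD_getD1, pvMkD_getD2, pvMkD_getD3, pvMkD_getD4,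
      pvMkD_getD5, pvRfind_pair, pvRfind_space, PySem.List.len]
    norm_num
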